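-- pv_equiv track=rewrite | github.com/Bigizic/Test-Codes | old/python3/tun/up.py | sn
-- ===== SOURCE A (Python) =====
-- def sn(n: int):
--     if n < 5:
--         return 0
--
--     count = 0
--     a_list = []
--     for i in range(1, n + 1):
--         a_list.append(i**2)
--     b_list = a_list
--
--     for i in range(n):
--         count += itera(n, i, a_list, b_list)
--     return count
--
-- def itera(n: int, i: int, a_list: list, b_list: list):
--     count = 0
--     for it in range(0, n):
--         if a_list[i] + b_list[it] in b_list:
--             count += 1
--     return count
-- ===== SOURCE B (Python) =====
-- def sn(n: int):
--     count = 0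
--     nn = n * n
--     for a in range(1, n + 1):
--         for b in range(1, n + 1):
--             s = a * a + b * b
--             if s <= nn and _is_square(s):
--                 count += 1
--     return count
--
--
-- def _is_square(s: int) -> bool:
--     lo, hi = 0, s
--     while lo < hi:
--         mid = (lo + hi + 1) // 2
--         if mid * mid <= s:
--             lo = mid
--         else:
--             hi = mid - 1
--     return lo * lo == s
-- ===== Notes on version B (the rewrite author's own statement) =====
-- stated objective: alternative
-- what changed: Instead of building a list of the first n squares and testing each pair sum by a linear list-membership scan, B tests each pair sum s=a*a+b*b directly with s<=n*n and a binary-search perfect-square check, dropping the square table and the vacuous small-n guard.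
import Mathlib
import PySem

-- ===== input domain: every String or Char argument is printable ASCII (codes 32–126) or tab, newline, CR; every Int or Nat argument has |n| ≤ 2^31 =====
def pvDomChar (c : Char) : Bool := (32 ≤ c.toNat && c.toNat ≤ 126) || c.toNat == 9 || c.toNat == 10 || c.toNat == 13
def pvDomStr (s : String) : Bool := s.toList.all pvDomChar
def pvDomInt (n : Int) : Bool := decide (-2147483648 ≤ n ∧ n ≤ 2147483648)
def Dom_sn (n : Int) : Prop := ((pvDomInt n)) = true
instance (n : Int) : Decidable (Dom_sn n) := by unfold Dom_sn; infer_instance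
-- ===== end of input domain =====

-- B replaces A's square table + linear membership scan with a direct arithmetic
-- perfect-square test by binary search, and drops the vacuous small-n guard.

-- ===== PORT A =====
-- helper 'itera' of A; a_list[i]/b_list[it] are always in range on the path reached
-- (0 ≤ i,it < n = length), so pyGetD with default 0 is exact here.
def snItera (n i : Int) (aList bList : List Int) : Int :=
  (PySem.List.pyRange 0 n 1).foldl (fun count it =>
    if bList.contains (PySem.List.pyGetD aList i 0 + PySem.List.pyGetD bList it 0)
    then count + 1 else count) 0

def sn (n : Int) : Int :=
  if n < 5 then 0
  else
    let aList := (PySem.List.pyRange 1 (n + 1) 1).foldl (fun acc i => acc ++ [i ^ 2]) []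
    let bList := aList
    (PySem.List.pyRange 0 n 1).foldl (fun count i => count + snItera n i aList bList) 0

-- ===== PORT B =====
-- B's while-loop binary search; the fuel argument only makes the same computation
-- total (the gap hi-lo strictly shrinks each step, so fuel = s.toNat suffices).
def snBsq : Nat → Int → Int → Int → Int
  | 0, _, lo, _ => lo
  | fuel + 1, s, lo, hi =>
    if lo < hi then
      let mid := PySem.Int.floordiv (lo + hi + 1) 2
      if mid * mid ≤ s then snBsq fuel s mid hi else snBsq fuel s lo (mid - 1)
    else lo

def snIsSquare (s : Int) : Bool :=
  let r := snBsq s.toNat s 0 s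
  r * r == s

def sn_alt (n : Int) : Int :=
  (PySem.List.pyRange 1 (n + 1) 1).foldl (fun count a =>
    (PySem.List.pyRange 1 (n + 1) 1).foldl (fun count b =>
      if a * a + b * b ≤ n * n ∧ snIsSquare (a * a + b * b) = true then count + 1 else count) count) 0

-- ===== PRECONDITION & SPEC =====
def Spec_sn (n : Int) (out : Int) : Prop := out = sn_alt n
instance (n : Int) (out : Int) : Decidable (Spec_sn n out) := by unfold Spec_sn; infer_instance

-- ===== CLAIM (what is proved, stated in full; the proofs are below) =====
def Claim_equal_sn : Prop := ∀ (n : Int), Dom_sn n → Spec_sn n (sn n)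

-- ===== LEMMAS AND PROOFS =====

-- midpoint bounds of B's binary search
theorem snMidBounds (lo hi : Int) (h : lo < hi) :
    lo < PySem.Int.floordiv (lo + hi + 1) 2 ∧ PySem.Int.floordiv (lo + hi + 1) 2 ≤ hi := by
  rw [PySem.Int.floordiv_eq_ediv_of_pos (by norm_num)]
  omega

-- correctness of B's binary search: with an invariant bracket and enough fuel it
-- returns the integer square root
theorem snBsq_spec : ∀ (fuel : Nat) (s lo hi : Int), 0 ≤ lo → lo ≤ hi →
    lo * lo ≤ s → s < (hi + 1) * (hi + 1) → (hi - lo).toNat ≤ fuel →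
    0 ≤ snBsq fuel s lo hi ∧ snBsq fuel s lo hi * snBsq fuel s lo hi ≤ s ∧
      s < (snBsq fuel s lo hi + 1) * (snBsq fuel s lo hi + 1) := by
  intro fuel
  induction fuel with
  | zero =>
    intro s lo hi h0 hle hlo hhi hf
    have : lo = hi := by omega
    subst this
    simpa [snBsq] using ⟨h0, hlo, hhi⟩
  | succ fuel ih =>
    intro s lo hi h0 hle hlo hhi hf
    by_cases h : lo < hi
    · have hm := snMidBounds lo hi h
      simp only [snBsq, if_pos h]
      by_cases hms : PySem.Int.floordiv (lo + hi + 1) 2 * PySem.Int.floordiv (lo + hi + 1) 2 ≤ s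
      · simp only [if_pos hms]
        exact ih s _ hi (by omega) (by omega) hms hhi (by omega)
      · simp only [if_neg hms]
        exact ih s lo _ h0 (by nlinarith) hlo (by nlinarith) (by omega)
    · have : lo = hi := by omega
      subst this
      simpa [snBsq] using ⟨h0, hlo, hhi⟩

-- a*a ≤ b*b → a ≤ b for nonnegative integers
theorem snSqLe {a b : Int} (ha : 0 ≤ a) (hb : 0 ≤ b) (h : a * a ≤ b * b) : a ≤ b := by
  nlinarith

-- characterisation of B's perfect-square test on positive inputs
theorem snIsSquare_iff (s : Int) (hs : 1 ≤ s) :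
    snIsSquare s = true ↔ ∃ r, 1 ≤ r ∧ r * r = s := by
  have hspec := snBsq_spec s.toNat s 0 s le_rfl (by omega) (by nlinarith) (by nlinarith) (by omega)
  obtain ⟨hr0, hrle, hrlt⟩ := hspec
  unfold snIsSquare
  simp only [beq_iff_eq]
  constructor
  · intro hrr
    refine ⟨snBsq s.toNat s 0 s, ?_, hrr⟩
    rcases eq_or_lt_of_le hr0 with h | h
    · exfalso; rw [← h] at hrr; omega
    · omega
  · rintro ⟨k, hk1, hkk⟩
    have h1 : snBsq s.toNat s 0 s ≤ k := snSqLe hr0 (by omega) (by omega)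
    have h2 : k ≤ snBsq s.toNat s 0 s := by
      have := snSqLe (a := k) (b := snBsq s.toNat s 0 s + 1) (by omega) (by omega) (by nlinarith)
      nlinarith
    have : k = snBsq s.toNat s 0 s := le_antisymm h2 h1
    rw [← this, hkk]

-- the listed-squares membership test of A equals B's arithmetic test, inside the loops
theorem snCondEq (n a b : Int) (ha1 : 1 ≤ a) (han : a ≤ n) (_hb1 : 1 ≤ b) (_hbn : b ≤ n) :
    ((PySem.List.pyRange 1 (n + 1) 1).map (fun i => i ^ 2)).contains (a ^ 2 + b ^ 2) =
      decide (a * a + b * b ≤ n * n ∧ snIsSquare (a * a + b * b) = true) := by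
  have hab : a ^ 2 + b ^ 2 = a * a + b * b := by ring
  have hs1 : 1 ≤ a * a + b * b := by nlinarith
  rw [Bool.eq_iff_iff]
  simp only [List.contains_eq_mem, List.mem_map, decide_eq_true_eq,
    PySem.List.mem_pyRange_one]
  constructor
  · rintro ⟨i, ⟨hi1, hi2⟩, hie⟩
    have hie' : i * i = a * a + b * b := by rw [← hab, ← hie]; ring
    constructor
    · nlinarith
    · exact (snIsSquare_iff _ hs1).2 ⟨i, hi1, hie'⟩
  · rintro ⟨hle, hsq⟩
    obtain ⟨r, hr1, hrr⟩ := (snIsSquare_iff _ hs1).1 hsq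
    refine ⟨r, ⟨hr1, ?_⟩, by rw [hab, ← hrr]; ring⟩
    have : r ≤ n := snSqLe (by omega) (by omega) (by omega)
    omega

-- an index loop reading xs[i] as a fold over the list itself, summed
theorem snOuter (L : List Int) (F : Int → Int) :
    (PySem.List.pyRange 0 (L.length : Int) 1).foldl (fun c i => c + F (PySem.List.pyGetD L i 0)) 0 =
      (L.map F).sum := by
  rw [PySem.List.foldl_pyRange_zero_pyGetD' L 0 (fun c x => c + F x) 0]
  rw [PySem.List.foldl_add]
  ring

-- A's helper as a count over the squares list
theorem snItera_eq (n i : Int) (L : List Int) (hlen : (L.length : Int) = n) :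
    snItera n i L L = ↑(L.countP (fun y => L.contains (PySem.List.pyGetD L i 0 + y))) := by
  unfold snItera
  rw [← hlen]
  rw [PySem.List.foldl_pyRange_zero_pyGetD' L 0
    (fun count y => if L.contains (PySem.List.pyGetD L i 0 + y) = true then count + 1 else count) 0]
  rw [PySem.List.foldl_count_if]
  ring

-- B's inner loop as a count
theorem snInnerEq (n a : Int) (c : Int) :
    (PySem.List.pyRange 1 (n + 1) 1).foldl
      (fun count b => if a * a + b * b ≤ n * n ∧ snIsSquare (a * a + b * b) = true then count + 1 else count) c =
    c + ↑((PySem.List.pyRange 1 (n + 1) 1).countP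
      (fun b => decide (a * a + b * b ≤ n * n ∧ snIsSquare (a * a + b * b) = true))) := by
  rw [show (fun (count b : Int) => if a * a + b * b ≤ n * n ∧ snIsSquare (a * a + b * b) = true then count + 1 else count) =
      (fun count b => if (fun b => decide (a * a + b * b ≤ n * n ∧ snIsSquare (a * a + b * b) = true)) b = true then count + 1 else count) from by
    funext count b
    simp]
  rw [PySem.List.foldl_count_if]

-- B as a sum of counts
theorem sn_alt_eq (n : Int) :
    sn_alt n = ((PySem.List.pyRange 1 (n + 1) 1).map
      (fun a => (((PySem.List.pyRange 1 (n + 1) 1).countP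
        (fun b => decide (a * a + b * b ≤ n * n ∧ snIsSquare (a * a + b * b) = true))) : Int))).sum := by
  unfold sn_alt
  rw [show (fun (count a : Int) => (PySem.List.pyRange 1 (n + 1) 1).foldl
      (fun count b => if a * a + b * b ≤ n * n ∧ snIsSquare (a * a + b * b) = true then count + 1 else count) count) =
      (fun count a => count + ↑((PySem.List.pyRange 1 (n + 1) 1).countP
        (fun b => decide (a * a + b * b ≤ n * n ∧ snIsSquare (a * a + b * b) = true)))) from by
    funext count a
    exact snInnerEq n a count]
  rw [PySem.List.foldl_add]
  ring

-- B returns 0 below A's guard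
theorem sn_alt_small (n : Int) (h : n < 5) : sn_alt n = 0 := by
  by_cases h0 : n ≤ 0
  · unfold sn_alt
    rw [PySem.List.pyRange_one_eq_nil (by omega)]
    simp
  · interval_cases n <;> decide

-- A as the same sum of counts, for n ≥ 5
theorem sn_eq (n : Int) (hn : 5 ≤ n) :
    sn n = ((PySem.List.pyRange 1 (n + 1) 1).map
      (fun a => (((PySem.List.pyRange 1 (n + 1) 1).countP
        (fun b => ((PySem.List.pyRange 1 (n + 1) 1).map (fun i => i ^ 2)).contains (a ^ 2 + b ^ 2))) : Int))).sum := by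
  have hAlist : (PySem.List.pyRange 1 (n + 1) 1).foldl (fun acc i => acc ++ [i ^ 2]) [] =
      (PySem.List.pyRange 1 (n + 1) 1).map (fun i => i ^ 2) := by
    rw [PySem.List.foldl_append_singleton_eq_map]
    simp
  set L := (PySem.List.pyRange 1 (n + 1) 1).map (fun i => i ^ 2) with hL
  have hlen : (L.length : Int) = n := by
    simp [hL, PySem.List.length_pyRange_one]
    omega
  unfold sn
  rw [if_neg (by omega)]
  simp only [hAlist]
  rw [show (fun (count i : Int) => count + snItera n i L L) =
      (fun (count i : Int) => count + (fun x => (↑(L.countP (fun y => L.contains (x + y))) : Int)) (PySem.List.pyGetD L i 0)) from by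
    funext count i
    rw [snItera_eq n i L hlen]]
  rw [← hlen]
  rw [snOuter L (fun x => (↑(L.countP (fun y => L.contains (x + y))) : Int))]
  conv_lhs => rw [hL]
  rw [List.map_map]
  rw [hlen]
  apply congrArg
  apply List.map_congr_left
  intro a _
  simp only [Function.comp_def, hL, List.countP_map]


-- ===== VERDICT (by name: the statement is the Claim_ definition above) =====
theorem sn_spec : Claim_equal_sn := by
  intro n _
  unfold Spec_sn
  by_cases h5 : n < 5
  · rw [sn_alt_small n h5]
    unfold sn
    rw [if_pos h5]
  · rw [not_lt] at h5
    rw [sn_eq n h5, sn_alt_eq n]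
    apply congrArg
    apply List.map_congr_left
    intro a ha
    rw [PySem.List.mem_pyRange_one] at ha
    apply congrArg
    apply List.countP_congr
    intro b hb
    rw [PySem.List.mem_pyRange_one] at hb
    rw [snCondEq n a b (by omega) (by omega) (by omega) (by omega)]
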